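-- pv_equiv track=rewrite | github.com/unseeyou/BoxNCrates-bot | cogs/MHBOTCMDS.py | strip_fancytext
-- ===== SOURCE A (Python) =====
-- def strip_fancytext(x: str):
--     x = x.replace("<", "*<")
--     x = x.replace(">", ">*")
--     y = x.split("*")
--     res = []
--     for i in y:
--         if len(i) != 0:
--             if i[0] == "<" and i[-1] == ">":
--                 res.append("")
--             else:
--                 res.append(i)
--     res = "".join(res)
--     return res
-- ===== SOURCE B (Python) =====
-- def strip_fancytext(x: str):
--     out = []
--     i = 0
--     n = len(x)
--     while i < n:
--         c = x[i]
--         if c == "*":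
--             i += 1
--         elif c == "<":
--             j = i + 1
--             while j < n and x[j] not in "<>*":
--                 j += 1
--             if j < n and x[j] == ">":
--                 i = j + 1
--             else:
--                 out.append(x[i:j])
--                 i = j
--         else:
--             out.append(c)
--             i += 1
--     return "".join(out)
-- ===== Notes on version B (the rewrite author's own statement) =====
-- stated objective: alternative
-- what changed: Replaced A's replace('<','*<')/replace('>','>*')/split('*')/filter/join pipeline by a single left-to-right index scan that skips '*', skips closed '<...>' tags by lookahead, and emits everything else.
import Mathlib
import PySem

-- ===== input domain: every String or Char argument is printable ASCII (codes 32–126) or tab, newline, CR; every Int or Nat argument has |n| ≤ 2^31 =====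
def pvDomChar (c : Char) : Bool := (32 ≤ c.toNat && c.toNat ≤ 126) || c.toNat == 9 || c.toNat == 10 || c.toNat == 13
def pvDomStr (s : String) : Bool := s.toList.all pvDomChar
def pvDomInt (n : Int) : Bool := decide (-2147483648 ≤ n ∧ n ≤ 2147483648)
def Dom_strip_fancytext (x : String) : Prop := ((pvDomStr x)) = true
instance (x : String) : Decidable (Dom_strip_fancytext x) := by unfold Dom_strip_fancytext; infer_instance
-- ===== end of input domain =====

-- B replaces A's replace/replace/split/filter/join pipeline by a single left-to-right scan (objective: alternative, similar cost).

-- ===== PORT A =====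
-- literal transliteration of A: replace "<"→"*<", ">"→">*", split on "*",
-- keep pieces unless they start with '<' and end with '>', join.
def strip_fancytext_list (cs : List Char) : List Char :=
  let x1 := PySem.Chars.replace cs ['<'] ['*', '<']
  let x2 := PySem.Chars.replace x1 ['>'] ['>', '*']
  let y := PySem.Chars.splitOn x2 ['*']
  let res := y.foldl (fun res i =>
    if i.length ≠ 0 then
      if PySem.List.pyGet? i 0 = some '<' ∧ PySem.List.pyGet? i (-1) = some '>' then
        res ++ [([] : List Char)]
      else res ++ [i]
    else res) []
  PySem.Chars.join [] res

def strip_fancytext (x : String) : String := String.ofList (strip_fancytext_list x.toList)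

-- ===== PORT B =====
-- Source B's test `x[j] not in "<>*"`
def pvPlain (c : Char) : Bool := !(c = '<' || c = '>' || c = '*')

-- Source B's single scan: skip '*'; at '<' look past the run of plain chars,
-- skip the whole tag if it is closed by '>', else emit '<'+run; else emit the char.
def strip_fancytext_scan : List Char → List Char
  | [] => []
  | c :: t =>
    if c = '*' then strip_fancytext_scan t
    else if c = '<' then
      if (t.dropWhile pvPlain).head? = some '>' then
        strip_fancytext_scan (t.dropWhile pvPlain).tail
      else
        '<' :: t.takeWhile pvPlain ++ strip_fancytext_scan (t.dropWhile pvPlain)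
    else c :: strip_fancytext_scan t
termination_by cs => cs.length
decreasing_by
  · simp
  · have h1 := List.length_dropWhile_le pvPlain t
    have h2 : (t.dropWhile pvPlain).tail.length ≤ (t.dropWhile pvPlain).length := by
      simp [List.length_tail]
    simp at h2 ⊢; omega
  · have h1 := List.length_dropWhile_le pvPlain t
    simp; omega
  · simp

def strip_fancytext_alt (x : String) : String := String.ofList (strip_fancytext_scan x.toList)

-- ===== PRECONDITION & SPEC =====
def Spec_strip_fancytext (x : String) (out : String) : Prop := out = strip_fancytext_alt x
instance (x : String) (out : String) : Decidable (Spec_strip_fancytext x out) := by unfold Spec_strip_fancytext; infer_instance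

-- ===== CLAIM (what is proved, stated in full; the proofs are below) =====
def Claim_equal_strip_fancytext : Prop := ∀ (x : String), Dom_strip_fancytext x → Spec_strip_fancytext x (strip_fancytext x)

-- ===== LEMMAS AND PROOFS =====

-- the combined effect of the two replaces, characterised per character
def pvHmap (c : Char) : List Char :=
  if c = '<' then ['*', '<'] else if c = '>' then ['>', '*'] else [c]

-- structural split on '*'
def pvSp : List Char → List (List Char)
  | [] => [[]]
  | c :: t => if c = '*' then [] :: pvSp t else (pvSp t).modifyHead (c :: ·)

-- the kept part of one piece
def pvK (p : List Char) : List Char :=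
  if p.head? = some '<' ∧ p.getLast? = some '>' then [] else p

-- replace with a one-char pattern is a flatMap
theorem pv_replace_go_single (c : Char) (new : List Char) :
    ∀ (l : List Char) (fuel : Nat) (acc : List Char), l.length ≤ fuel →
      PySem.Chars.replace.go [c] new fuel l acc
        = acc.reverse ++ l.flatMap (fun d => if d = c then new else [d]) := by
  intro l
  induction l with
  | nil => intro fuel acc _; cases fuel <;> simp [PySem.Chars.replace.go]
  | cons d t ih =>
    intro fuel acc hf
    cases fuel with
    | zero => simp at hf
    | succ f =>
      simp only [PySem.Chars.replace.go]
      by_cases hdc : d = c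
      · subst hdc
        simp only [List.isPrefixOf, BEq.rfl, Bool.and_self, if_true]
        rw [show ([d].length = 1) from rfl]
        simp only [List.drop_succ_cons, List.drop_zero]
        rw [ih f (new.reverse ++ acc) (by simpa using Nat.le_of_succ_le_succ hf)]
        simp
      · have : [c].isPrefixOf (d :: t) = false := by
          simp [List.isPrefixOf]; exact fun h => absurd h.symm hdc
        rw [this]
        simp only [Bool.false_eq_true, if_false]
        rw [ih f (d :: acc) (Nat.le_of_succ_le_succ hf)]
        simp [hdc]

theorem pv_replace_single (cs : List Char) (c : Char) (new : List Char) :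
    PySem.Chars.replace cs [c] new = cs.flatMap (fun d => if d = c then new else [d]) := by
  rw [PySem.Chars.replace]
  simp only [List.isEmpty_cons, Bool.false_eq_true, if_false]
  simpa using pv_replace_go_single c new cs cs.length [] le_rfl

-- pvSp always yields a first piece, which is the '*'-free prefix
theorem pv_sp_head : ∀ (u : List Char), ∃ qs, pvSp u = u.takeWhile (fun d => !(d = '*')) :: qs := by
  intro u
  induction u with
  | nil => exact ⟨[], rfl⟩
  | cons c t ih =>
    obtain ⟨qs, hqs⟩ := ih
    by_cases hc : c = '*'
    · subst hc; exact ⟨pvSp t, by simp [pvSp]⟩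
    · refine ⟨qs, ?_⟩
      simp [pvSp, hc, hqs, List.modifyHead]

theorem pv_splitOn_go_star :
    ∀ (l : List Char) (fuel : Nat) (cur : List Char) (acc : List (List Char)), l.length ≤ fuel →
      PySem.Chars.splitOn.go ['*'] fuel l cur acc
        = acc.reverse ++ (pvSp l).modifyHead (cur.reverse ++ ·) := by
  intro l
  induction l with
  | nil => intro fuel cur acc _; cases fuel <;> simp [PySem.Chars.splitOn.go, pvSp, List.modifyHead]
  | cons c t ih =>
    intro fuel cur acc hf
    cases fuel with
    | zero => simp at hf
    | succ f =>
      simp only [PySem.Chars.splitOn.go]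
      by_cases hc : c = '*'
      · subst hc
        simp only [List.isPrefixOf, BEq.rfl, Bool.and_self, if_true]
        rw [show (['*'].length = 1) from rfl]
        simp only [List.drop_succ_cons, List.drop_zero]
        rw [ih f [] (cur.reverse :: acc) (Nat.le_of_succ_le_succ hf)]
        obtain ⟨qs, hqs⟩ := pv_sp_head t
        simp [pvSp, hqs, List.modifyHead]
      · have : ['*'].isPrefixOf (c :: t) = false := by
          simp [List.isPrefixOf]; exact fun h => absurd h.symm hc
        rw [this]
        simp only [Bool.false_eq_true, if_false]
        rw [ih f (c :: cur) acc (Nat.le_of_succ_le_succ hf)]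
        obtain ⟨qs, hqs⟩ := pv_sp_head t
        simp [pvSp, hc, hqs, List.modifyHead]

theorem pv_splitOn_star (u : List Char) : PySem.Chars.splitOn u ['*'] = pvSp u := by
  rw [PySem.Chars.splitOn, pv_splitOn_go_star u (u.length + 1) [] [] (by omega)]
  obtain ⟨qs, hqs⟩ := pv_sp_head u
  simp [hqs, List.modifyHead]

theorem pv_join_nil (ps : List (List Char)) : PySem.Chars.join [] ps = ps.flatten := by
  induction ps with
  | nil => rfl
  | cons p ps ih =>
    cases ps with
    | nil => simp [PySem.Chars.join, List.intercalate, List.intersperse]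
    | cons q r =>
      simp only [PySem.Chars.join, List.intercalate, List.intersperse] at ih ⊢
      simp_all

theorem pv_flatten_flatMap (l : List (List Char)) (g : List Char → List (List Char)) :
    (l.flatMap g).flatten = l.flatMap (fun x => (g x).flatten) := by
  induction l with
  | nil => simp
  | cons p ps ih => simp [ih]

-- pyGet? 0 / -1 on a nonempty list are head?/getLast?
theorem pv_pyGet_zero (i : List Char) : PySem.List.pyGet? i 0 = i.head? := by
  cases i <;> simp [PySem.List.pyGet?, PySem.List.pyIdx?]

theorem pv_pyGet_neg_one (i : List Char) (h : i ≠ []) :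
    PySem.List.pyGet? i (-1) = i.getLast? := by
  have hlen : 0 < i.length := List.length_pos_iff.mpr h
  simp only [PySem.List.pyGet?, PySem.List.pyIdx?]
  have h1 : ¬ ((0:Int) ≤ -1) := by omega
  have h2 : (-(i.length : Int)) ≤ -1 := by omega
  simp only [h1, h2, if_true, if_false]
  rw [List.getLast?_eq_getElem?]
  norm_num

-- A's pipeline, characterised
theorem pv_A_char (cs : List Char) :
    strip_fancytext_list cs = ((pvSp (cs.flatMap pvHmap)).flatMap pvK) := by
  show PySem.Chars.join []
      ((PySem.Chars.splitOn (PySem.Chars.replace (PySem.Chars.replace cs ['<'] ['*', '<'])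
        ['>'] ['>', '*']) ['*']).foldl (fun res i =>
      if i.length ≠ 0 then
        if PySem.List.pyGet? i 0 = some '<' ∧ PySem.List.pyGet? i (-1) = some '>' then
          res ++ [([] : List Char)]
        else res ++ [i]
      else res) []) = _
  rw [pv_replace_single, pv_replace_single, List.flatMap_assoc]
  have hmap : (fun d => ((fun d => if d = '<' then ['*', '<'] else [d]) d).flatMap
      (fun d => if d = '>' then ['>', '*'] else [d])) = pvHmap := by
    funext d
    by_cases h1 : d = '<' <;> by_cases h2 : d = '>' <;> simp_all [pvHmap]
  rw [hmap, pv_splitOn_star]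
  have hbody : (fun (res : List (List Char)) (i : List Char) =>
      if i.length ≠ 0 then
        if PySem.List.pyGet? i 0 = some '<' ∧ PySem.List.pyGet? i (-1) = some '>' then
          res ++ [([] : List Char)]
        else res ++ [i]
      else res)
      = fun res i => res ++ (if i.length ≠ 0 then
          (if PySem.List.pyGet? i 0 = some '<' ∧ PySem.List.pyGet? i (-1) = some '>' then
            [([] : List Char)] else [i]) else []) := by
    funext res i; split_ifs <;> simp
  rw [hbody, PySem.List.foldl_append_eq_flatMap, pv_join_nil]
  simp only [List.nil_append]
  rw [pv_flatten_flatMap]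
  congr 1
  funext i
  by_cases hnil : i = []
  · subst hnil; simp [pvK]
  · have hlen : i.length ≠ 0 := by simpa using hnil
    simp only [hlen, ne_eq, not_false_iff, if_true, pvK,
      pv_pyGet_zero, pv_pyGet_neg_one i hnil]
    split_ifs <;> simp

theorem pv_flatMap_hmap_head (t : List Char) : (t.flatMap pvHmap).head? ≠ some '<' := by
  cases t with
  | nil => simp
  | cons c t =>
    by_cases h1 : c = '<' <;> by_cases h2 : c = '>' <;> simp_all [pvHmap]

theorem pv_plain_spec (c : Char) (h : pvPlain c = true) : ¬ c = '<' ∧ ¬ c = '>' ∧ ¬ c = '*' := by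
  simp only [pvPlain, Bool.not_eq_eq_eq_not, Bool.not_true, Bool.or_eq_false_iff,
    decide_eq_false_iff_not] at h
  exact ⟨h.1.1, h.1.2, h.2⟩

theorem pv_hmap_plain (c : Char) (h : pvPlain c = true) : pvHmap c = [c] := by
  obtain ⟨h1, h2, _⟩ := pv_plain_spec c h
  simp [pvHmap, h1, h2]

theorem pv_flatMap_plain_append (run rest : List Char) (h : ∀ c ∈ run, pvPlain c = true) :
    (run ++ rest).flatMap pvHmap = run ++ rest.flatMap pvHmap := by
  induction run with
  | nil => simp
  | cons c r ih =>
    simp only [List.cons_append, List.flatMap_cons, pv_hmap_plain c (h c (by simp))]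
    rw [ih (fun d hd => h d (by simp [hd]))]
    simp

theorem pv_sp_nostar_append (run : List Char) (h : ∀ c ∈ run, ¬ c = '*') :
    ∀ (u : List Char) (q : List Char) (qs : List (List Char)), pvSp u = q :: qs →
    pvSp (run ++ u) = (run ++ q) :: qs := by
  induction run with
  | nil => intro u q qs hu; simpa using hu
  | cons c r ih =>
    intro u q qs hu
    have hcs : ¬ (c = '*') := h c (by simp)
    simp [pvSp, hcs, ih (fun d hd => h d (by simp [hd])) u q qs hu, List.modifyHead]

-- a piece '<' :: run with run plain is kept
theorem pv_K_open (run : List Char) (h : ∀ c ∈ run, pvPlain c = true) :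
    pvK ('<' :: run) = '<' :: run := by
  unfold pvK
  rw [if_neg]
  rintro ⟨-, h2⟩
  have hmem : '>' ∈ '<' :: run := by
    have := List.mem_of_getLast? (l := '<' :: run) (a := '>') h2
    exact this
  rcases List.mem_cons.mp hmem with heq | hmem
  · exact absurd heq (by decide)
  · exact absurd (pv_plain_spec _ (h _ hmem)).2.1 (by simp)

-- a piece '<' :: run ++ ['>'] is dropped
theorem pv_K_closed (run : List Char) :
    pvK ('<' :: (run ++ ['>'])) = [] := by
  unfold pvK
  rw [if_pos]
  constructor
  · rfl
  · rw [show ('<' :: (run ++ ['>'])) = ('<' :: run) ++ ['>'] from by simp,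
        List.getLast?_concat]

-- the main equivalence of the two characterisations
theorem pv_main : ∀ (n : Nat) (cs : List Char), cs.length ≤ n →
    (pvSp (cs.flatMap pvHmap)).flatMap pvK = strip_fancytext_scan cs := by
  intro n
  induction n with
  | zero =>
    intro cs h
    have : cs = [] := List.length_eq_zero_iff.mp (Nat.le_zero.mp h)
    subst this; simp [pvSp, pvK, strip_fancytext_scan]
  | succ n ih =>
    intro cs hlen
    match cs with
    | [] => simp [pvSp, pvK, strip_fancytext_scan]
    | c :: t =>
      have hlt : t.length ≤ n := by simpa using hlen
      by_cases hstar : c = '*'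
      · subst hstar
        simp only [List.flatMap_cons, show pvHmap '*' = ['*'] from rfl, List.singleton_append,
          show ∀ u, pvSp ('*' :: u) = [] :: pvSp u from fun u => by simp [pvSp],
          List.flatMap_cons, show pvK [] = [] from rfl, List.nil_append]
        rw [ih t hlt, show strip_fancytext_scan ('*' :: t) = strip_fancytext_scan t from by
          rw [strip_fancytext_scan]; simp]
      · by_cases hopen : c = '<'
        · subst hopen
          have hrunplain : ∀ d ∈ t.takeWhile pvPlain, pvPlain d = true :=
            fun d hd => List.mem_takeWhile_imp hd
          have hscan : strip_fancytext_scan ('<' :: t)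
              = if (t.dropWhile pvPlain).head? = some '>' then
                  strip_fancytext_scan (t.dropWhile pvPlain).tail
                else '<' :: t.takeWhile pvPlain ++ strip_fancytext_scan (t.dropWhile pvPlain) := by
            rw [strip_fancytext_scan,
                if_neg (show ¬ ('<' : Char) = '*' by decide), if_pos rfl]
          have hfm : ('<' :: t.flatMap pvHmap)
              = ('<' :: t.takeWhile pvPlain) ++ (t.dropWhile pvPlain).flatMap pvHmap := by
            conv_lhs => rw [← List.takeWhile_append_dropWhile (p := pvPlain) (l := t)]
            rw [pv_flatMap_plain_append _ _ hrunplain]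
            simp
          have hnostar : ∀ d ∈ '<' :: t.takeWhile pvPlain, ¬ d = '*' := by
            intro d hd'
            rcases List.mem_cons.mp hd' with rfl | hd
            · decide
            · exact (pv_plain_spec _ (hrunplain _ hd)).2.2
          simp only [List.flatMap_cons, show pvHmap '<' = ['*', '<'] from rfl]
          rw [show (['*', '<'] ++ t.flatMap pvHmap) = '*' :: '<' :: t.flatMap pvHmap from rfl,
              show pvSp ('*' :: '<' :: t.flatMap pvHmap)
                = [] :: pvSp ('<' :: t.flatMap pvHmap) from by simp [pvSp],
              List.flatMap_cons, show pvK [] = [] from rfl, List.nil_append, hfm, hscan]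
          rcases hdw : t.dropWhile pvPlain with _ | ⟨d, r⟩
          · -- rest empty: the open tag is never closed
            simp only [List.flatMap_nil]
            rw [pv_sp_nostar_append _ hnostar [] [] [] rfl]
            simp [pv_K_open _ hrunplain, strip_fancytext_scan]
          · have hrlen : r.length + 1 ≤ t.length := by
              have := List.length_dropWhile_le pvPlain t
              rw [hdw] at this; simpa using this
            have hdnp : pvPlain d = false := by
              have := List.head_dropWhile_not pvPlain (l := t) (by simp [hdw])
              simpa [hdw] using this
            by_cases hdgt : d = '>'
            · -- closed tag: dropped
              subst hdgt
              simp only [List.flatMap_cons, show pvHmap '>' = ['>', '*'] from rfl]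
              rw [show (['>', '*'] ++ r.flatMap pvHmap) = '>' :: '*' :: r.flatMap pvHmap from rfl,
                  show ('<' :: t.takeWhile pvPlain) ++ '>' :: '*' :: r.flatMap pvHmap
                    = (('<' :: t.takeWhile pvPlain) ++ ['>']) ++ '*' :: r.flatMap pvHmap from by simp,
                  pv_sp_nostar_append _ (by
                    intro d hd
                    rcases List.mem_append.mp hd with hd | hd
                    · exact hnostar d hd
                    · simp at hd; subst hd; decide) _ [] (pvSp (r.flatMap pvHmap)) (by simp [pvSp])]
              simp only [List.flatMap_cons, List.append_nil]
              rw [show (('<' :: t.takeWhile pvPlain) ++ ['>'])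
                    = '<' :: (t.takeWhile pvPlain ++ ['>']) from by simp,
                  pv_K_closed, ih r (by omega)]
              simp
            · -- unclosed: '<' and the run are kept, rescan from d
              have hdrest : d = '<' ∨ d = '*' := by
                have h3 := hdnp
                simp only [pvPlain, Bool.not_eq_eq_eq_not, Bool.not_false, Bool.or_eq_true_iff,
                  decide_eq_true_eq] at h3
                rcases h3 with (h3 | h3) | h3
                · exact Or.inl h3
                · exact absurd h3 hdgt
                · exact Or.inr h3
              rcases hdrest with hd | hd
              · -- d = '<' : a new tag starts immediately
                subst hd
                simp only [List.flatMap_cons, show pvHmap '<' = ['*', '<'] from rfl]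
                rw [show (['*', '<'] ++ r.flatMap pvHmap) = '*' :: '<' :: r.flatMap pvHmap from rfl,
                    pv_sp_nostar_append _ hnostar _ [] (pvSp ('<' :: r.flatMap pvHmap))
                      (by simp [pvSp])]
                simp only [List.flatMap_cons, List.append_nil]
                rw [pv_K_open _ hrunplain]
                have hih := ih ('<' :: r) (by simpa using hrlen.trans hlt)
                simp only [List.flatMap_cons, show pvHmap '<' = ['*', '<'] from rfl] at hih
                rw [show (['*', '<'] ++ r.flatMap pvHmap) = '*' :: '<' :: r.flatMap pvHmap from rfl,
                    show pvSp ('*' :: '<' :: r.flatMap pvHmap)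
                      = [] :: pvSp ('<' :: r.flatMap pvHmap) from by simp [pvSp]] at hih
                simp only [List.flatMap_cons, show pvK [] = [] from rfl, List.nil_append] at hih
                rw [hih]
                simp
              · -- d = '*' : the piece ends here, kept
                subst hd
                simp only [List.flatMap_cons, show pvHmap '*' = ['*'] from rfl,
                  List.singleton_append]
                rw [show ('<' :: t.takeWhile pvPlain) ++ '*' :: r.flatMap pvHmap
                      = ('<' :: t.takeWhile pvPlain) ++ ('*' :: r.flatMap pvHmap) from rfl,
                    pv_sp_nostar_append _ hnostar _ [] (pvSp (r.flatMap pvHmap)) (by simp [pvSp])]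
                simp only [List.flatMap_cons, List.append_nil]
                rw [pv_K_open _ hrunplain, ih r (by omega),
                    show strip_fancytext_scan ('*' :: r) = strip_fancytext_scan r from by
                      rw [strip_fancytext_scan]; simp]
                simp
        · by_cases hgt : c = '>'
          · -- '>' outside a tag is kept verbatim
            subst hgt
            simp only [List.flatMap_cons, show pvHmap '>' = ['>', '*'] from rfl]
            rw [show (['>', '*'] ++ t.flatMap pvHmap) = '>' :: '*' :: t.flatMap pvHmap from rfl,
                show pvSp ('>' :: '*' :: t.flatMap pvHmap)
                  = ['>'] :: pvSp (t.flatMap pvHmap) from by simp [pvSp, List.modifyHead]]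
            simp only [List.flatMap_cons, show pvK ['>'] = ['>'] from by simp [pvK]]
            rw [ih t hlt, show strip_fancytext_scan ('>' :: t)
                = '>' :: strip_fancytext_scan t from by rw [strip_fancytext_scan]; simp]
            simp
          -- ordinary character
          simp only [List.flatMap_cons,
            show pvHmap c = [c] from by simp [pvHmap, hopen, hgt]]
          obtain ⟨qs, hqs⟩ := pv_sp_head (t.flatMap pvHmap)
          have hsp : pvSp (c :: t.flatMap pvHmap)
              = (c :: (t.flatMap pvHmap).takeWhile (fun d => !(d = '*'))) :: qs := by
            simp [pvSp, hstar, hqs, List.modifyHead]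
          rw [List.singleton_append, hsp]
          set q := (t.flatMap pvHmap).takeWhile (fun d => !(d = '*')) with hq
          have hqhead : q.head? ≠ some '<' := by
            have := pv_flatMap_hmap_head t
            cases hft : t.flatMap pvHmap with
            | nil => simp [hq, hft]
            | cons a b =>
              rw [hft] at this
              simp only [List.head?_cons, ne_eq, Option.some_inj] at this
              by_cases ha : a = '*'
              · simp [hq, hft, ha]
              · simp [hq, hft, ha, this]
          have hKfirst : pvK (c :: q) = c :: q := by
            simp [pvK, hopen]
          have hKq : pvK q = q := by
            simp only [pvK, ite_eq_right_iff]
            intro hcond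
            exact absurd hcond.1 hqhead
          simp only [List.flatMap_cons, hKfirst]
          have hih := ih t hlt
          rw [hqs] at hih
          simp only [List.flatMap_cons, hKq] at hih
          rw [show strip_fancytext_scan (c :: t) = c :: strip_fancytext_scan t
            from by rw [strip_fancytext_scan]; simp [hstar, hopen]]
          rw [← hih]
          simp

-- ===== VERDICT (by name: the statement is the Claim_ definition above) =====
theorem strip_fancytext_spec : Claim_equal_strip_fancytext := by
  intro x _
  unfold Spec_strip_fancytext strip_fancytext strip_fancytext_alt
  rw [pv_A_char, pv_main x.toList.length x.toList le_rfl]
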